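-- pv_equiv track=rewrite | github.com/vttilv/moon-dev-ai-agents | src/agents/phone_agent.py | split_into_phrases
-- ===== SOURCE A (Python) =====
-- def split_into_phrases(text):
--     """Split text into natural phrases for smoother speech"""
--     # Split on punctuation first
--     chunks = []
--     current = []
--
--     # Split into words
--     words = text.split()
--
--     for word in words:
--         current.append(word)
--         # If word ends with punctuation or we have enough words for a natural phrase
--         if (any(char in word for char in '.!?,') or
--             len(current) >= 8):  # Increased from 3 to 8 for more natural phrases
--             chunks.append(' '.join(current))
--             current = []
--
--     # Add any remaining words
--     if current:
--         chunks.append(' '.join(current))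
--
--     return chunks
-- ===== SOURCE B (Python) =====
-- def split_into_phrases(text):
--     """Split text into natural phrases for smoother speech"""
--     # Pass 1: cut the word list into segments ending at each punctuated word
--     segments = []
--     seg = []
--     for w in text.split():
--         seg.append(w)
--         if any(c in '.!?,' for c in w):
--             segments.append(seg)
--             seg = []
--     if seg:
--         segments.append(seg)
--     # Pass 2: break each segment into chunks of at most 8 words
--     phrases = []
--     for s in segments:
--         while len(s) > 8:
--             phrases.append(' '.join(s[:8]))
--             s = s[8:]
--         phrases.append(' '.join(s))
--     return phrases
-- ===== Notes on version B (the rewrite author's own statement) =====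
-- stated objective: alternative
-- what changed: Replaces A's single loop with a counter-carrying accumulator by a two-pass decomposition: first cut the word list into punctuation-terminated segments, then chunk each segment into groups of at most 8 words; correct because A's counter resets at every flush, so the 8-grouping is independent within each segment.
import Mathlib
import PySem

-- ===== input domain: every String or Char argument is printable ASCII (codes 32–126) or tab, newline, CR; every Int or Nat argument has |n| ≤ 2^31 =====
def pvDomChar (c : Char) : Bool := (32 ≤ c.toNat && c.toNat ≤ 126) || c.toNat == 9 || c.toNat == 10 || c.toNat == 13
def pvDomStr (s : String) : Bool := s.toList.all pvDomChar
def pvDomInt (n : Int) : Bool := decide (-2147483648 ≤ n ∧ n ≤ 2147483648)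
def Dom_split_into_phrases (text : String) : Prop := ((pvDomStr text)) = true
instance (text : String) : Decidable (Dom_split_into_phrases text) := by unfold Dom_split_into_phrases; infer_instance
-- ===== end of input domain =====

-- B replaces A's single counter-carrying loop by a two-pass decomposition (segments at punctuation, then 8-word chunks); alternative structure, same cost.


-- ===== PORT A =====
-- Python's "any(char in word for char in '.!?,')": each pattern is a single character,
-- so the substring test 'char in word' is exactly char membership in word's characters.
def pvHasPA (w : String) : Bool := ['.', '!', '?', ','].any (fun c => w.toList.contains c)

def split_into_phrases (text : String) : List String :=
  let words := PySem.Str.split₀ text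
  let st := words.foldl (fun (st : List String × List String) word =>
      let current := st.2 ++ [word]
      if pvHasPA word || decide (8 ≤ current.length) then
        (st.1 ++ [PySem.Str.join " " current], [])
      else (st.1, current)) ([], [])
  st.1 ++ (if st.2 = [] then [] else [PySem.Str.join " " st.2])

-- ===== PORT B =====
-- Source B's "any(c in '.!?,' for c in w)": membership of each character of w in the punctuation string.
def pvHasPB (w : String) : Bool := w.toList.any (fun c => ['.', '!', '?', ','].contains c)

-- the while-loop of Source B's second pass: peel off ' '.join(s[:8]) while len(s) > 8, then emit ' '.join(s)
def pvChunk8 (s : List String) : List String :=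
  if _h : 8 < s.length then
    PySem.Str.join " " (PySem.List.slice s none (some 8)) ::
      pvChunk8 (PySem.List.slice s (some 8) none)
  else [PySem.Str.join " " s]
termination_by s.length
decreasing_by
  rw [PySem.List.slice_from s (by norm_num)]
  simp
  omega

def split_into_phrases_alt (text : String) : List String :=
  let st := (PySem.Str.split₀ text).foldl
      (fun (st : List (List String) × List String) w =>
        let seg := st.2 ++ [w]
        if pvHasPB w then (st.1 ++ [seg], ([] : List String)) else (st.1, seg)) ([], [])
  let segments := st.1 ++ (if st.2 = [] then [] else [st.2])
  segments.foldl (fun phrases s => phrases ++ pvChunk8 s) []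

-- ===== PRECONDITION & SPEC =====
def Spec_split_into_phrases (text : String) (out : List String) : Prop := out = split_into_phrases_alt text
instance (text : String) (out : List String) : Decidable (Spec_split_into_phrases text out) := by unfold Spec_split_into_phrases; infer_instance

-- ===== CLAIM (what is proved, stated in full; the proofs are below) =====
def Claim_equal_split_into_phrases : Prop := ∀ (text : String), Dom_split_into_phrases text → Spec_split_into_phrases text (split_into_phrases text)

-- ===== LEMMAS AND PROOFS =====

-- named copies of the two ports' loop bodies (defeq to the inline lambdas)
def stepA (st : List String × List String) (word : String) : List String × List String :=
  if pvHasPA word || decide (8 ≤ (st.2 ++ [word]).length) then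
    (st.1 ++ [PySem.Str.join " " (st.2 ++ [word])], [])
  else (st.1, st.2 ++ [word])

def stepB (st : List (List String) × List String) (w : String) : List (List String) × List String :=
  if pvHasPB w then (st.1 ++ [st.2 ++ [w]], ([] : List String)) else (st.1, st.2 ++ [w])

-- recursive form of A's loop
def recA : List String → List String → List String
  | [], cur => if cur = [] then [] else [PySem.Str.join " " cur]
  | w :: ws, cur =>
      if pvHasPA w || decide (8 ≤ (cur ++ [w]).length)
      then PySem.Str.join " " (cur ++ [w]) :: recA ws []
      else recA ws (cur ++ [w])

-- recursive form of B's segmenting loop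
def segRec : List String → List String → List (List String)
  | [], seg => if seg = [] then [] else [seg]
  | w :: ws, seg =>
      if pvHasPB w then (seg ++ [w]) :: segRec ws [] else segRec ws (seg ++ [w])

-- flatten of B's second pass over a segment list
def FC (segs : List (List String)) : List String := segs.flatMap pvChunk8

lemma hasP_eq (w : String) : pvHasPA w = pvHasPB w := by
  simp only [pvHasPA, pvHasPB]
  rw [Bool.eq_iff_iff]
  simp [List.any_eq_true]
  constructor
  · rintro (h | h | h | h) <;> exact ⟨_, h, by simp⟩
  · rintro ⟨x, hx, rfl | rfl | rfl | rfl⟩ <;> simp [hx]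

lemma A_eval (ws : List String) : ∀ (ch cur : List String),
    (ws.foldl stepA (ch, cur)).1 ++
      (if (ws.foldl stepA (ch, cur)).2 = [] then []
       else [PySem.Str.join " " (ws.foldl stepA (ch, cur)).2]) = ch ++ recA ws cur := by
  induction ws with
  | nil =>
      intro ch cur
      simp only [List.foldl_nil, recA]
  | cons w ws ih =>
      intro ch cur
      simp only [List.foldl_cons, stepA, recA]
      split
      · rw [ih]; simp
      · rw [ih]


lemma B_eval (ws : List String) : ∀ (sg : List (List String)) (cur : List String),
    List.foldl (fun phrases s => phrases ++ pvChunk8 s) []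
      ((ws.foldl stepB (sg, cur)).1 ++
        (if (ws.foldl stepB (sg, cur)).2 = [] then [] else [(ws.foldl stepB (sg, cur)).2]))
      = FC (sg ++ segRec ws cur) := by
  induction ws with
  | nil =>
      intro sg cur
      simp only [List.foldl_nil, FC]
      rw [PySem.List.foldl_append_eq_flatMap]
      simp only [List.nil_append, segRec]
  | cons w ws ih =>
      intro sg cur
      simp only [List.foldl_cons, stepB, segRec]
      split
      · rw [ih]; simp [FC]
      · rw [ih]

lemma segRec_ne_nil (ws : List String) : ∀ (cur l : List String), l ∈ segRec ws cur → l ≠ [] := by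
  induction ws with
  | nil =>
      intro cur l hl
      simp only [segRec] at hl
      split at hl <;> simp_all
  | cons w ws ih =>
      intro cur l hl
      simp only [segRec] at hl
      split at hl
      · rcases List.mem_cons.mp hl with h | h
        · subst h; simp
        · exact ih [] l h
      · exact ih _ l hl

def prependFirst (a : List String) : List (List String) → List (List String)
  | [] => if a = [] then [] else [a]
  | s :: ss => (a ++ s) :: ss

lemma segRec_prepend (ws : List String) : ∀ (a b : List String),
    segRec ws (a ++ b) = prependFirst a (segRec ws b) := by
  induction ws with
  | nil =>
      intro a b
      simp only [segRec]
      by_cases hb : b = []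
      · subst hb
        by_cases ha : a = [] <;> simp [ha, prependFirst]
      · have : a ++ b ≠ [] := by simp [hb]
        simp [hb, this, prependFirst]
  | cons w ws ih =>
      intro a b
      simp only [segRec]
      split
      · simp [prependFirst]
      · rw [List.append_assoc, ih]

lemma pvChunk8_of_le {s : List String} (h : s.length ≤ 8) :
    pvChunk8 s = [PySem.Str.join " " s] := by
  rw [pvChunk8]
  rw [dif_neg (by omega)]

lemma pvChunk8_append {s t : List String} (hs : s.length = 8) (ht : t ≠ []) :
    pvChunk8 (s ++ t) = PySem.Str.join " " s :: pvChunk8 t := by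
  rw [pvChunk8]
  have hlen : 8 < (s ++ t).length := by
    simp [hs]
    exact List.length_pos_iff.mpr ht
  rw [dif_pos hlen]
  have h1 : PySem.List.slice (s ++ t) none (some 8) = s := by
    rw [show ((8 : Int)) = ((8 : Nat) : Int) by norm_num, PySem.List.slice_to_natCast]
    exact List.take_left' hs
  have h2 : PySem.List.slice (s ++ t) (some 8) none = t := by
    rw [show ((8 : Int)) = ((8 : Nat) : Int) by norm_num, PySem.List.slice_from_natCast]
    exact List.drop_left' hs
  rw [h1, h2]

lemma FC_cons8 (ws : List String) (s : List String) (hs : s.length = 8) :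
    FC (segRec ws s) = PySem.Str.join " " s :: FC (segRec ws []) := by
  have hpre := segRec_prepend ws s []
  rw [List.append_nil] at hpre
  rw [hpre]
  cases h : segRec ws [] with
  | nil =>
      have hne : s ≠ [] := by intro h'; subst h'; simp at hs
      simp [prependFirst, hne, FC, pvChunk8_of_le (le_of_eq hs)]
  | cons t ts =>
      have ht : t ≠ [] := segRec_ne_nil ws [] t (h ▸ List.mem_cons_self)
      simp only [prependFirst, FC, List.flatMap_cons]
      rw [pvChunk8_append hs ht]
      simp

lemma main_lemma (ws : List String) : ∀ (cur : List String), cur.length < 8 →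
    recA ws cur = FC (segRec ws cur) := by
  induction ws with
  | nil =>
      intro cur hcur
      simp only [recA, segRec]
      by_cases hc : cur = []
      · simp [hc, FC]
      · simp [hc, FC, pvChunk8_of_le (le_of_lt hcur)]
  | cons w ws ih =>
      intro cur hcur
      simp only [recA, segRec, hasP_eq]
      by_cases hp : pvHasPB w = true
      · simp only [hp, if_true, Bool.true_or]
        rw [ih [] (by norm_num)]
        simp only [FC, List.flatMap_cons]
        rw [pvChunk8_of_le (by simp; omega)]
        simp
      · rw [Bool.not_eq_true] at hp
        simp only [hp, Bool.false_or, Bool.false_eq_true, if_false]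
        by_cases h8 : 8 ≤ (cur ++ [w]).length
        · have hlen : (cur ++ [w]).length = 8 := by simp at h8 ⊢; omega
          simp only [decide_eq_true_eq, h8, if_true]
          rw [ih [] (by norm_num), FC_cons8 ws _ hlen]
        · simp only [decide_eq_true_eq, h8, if_false]
          exact ih (cur ++ [w]) (by simp at h8 ⊢; omega)

-- ===== VERDICT (by name: the statement is the Claim_ definition above) =====
theorem split_into_phrases_spec : Claim_equal_split_into_phrases := by
  intro text _
  show split_into_phrases text = split_into_phrases_alt text
  refine Eq.trans (A_eval (PySem.Str.split₀ text) [] []) ?_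
  refine Eq.trans ?_ (B_eval (PySem.Str.split₀ text) [] []).symm
  simp only [List.nil_append]
  exact main_lemma (PySem.Str.split₀ text) [] (by norm_num)
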